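-- pv_equiv track=rewrite | github.com/natasha/corus | corus/sources/omnia.py | group_pairs
-- ===== SOURCE A (Python) =====
-- def group_pairs(stream):
--     previous = None
--     for item in stream:
--         if previous:
--             yield previous, item
--         previous = item
--     if previous:
--         yield previous, None
-- ===== SOURCE B (Python) =====
-- def group_pairs(stream):
--     items = list(stream)
--     for cur, nxt in zip(items, items[1:] + [None]):
--         if cur:
--             yield cur, nxt
-- ===== Notes on version B (the rewrite author's own statement) =====
-- stated objective: idiomatic
-- what changed: Replaces the backward-looking 'previous' accumulator loop with materializing the stream and zipping it against its own tail extended by None, filtering on truthiness.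
import Mathlib
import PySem

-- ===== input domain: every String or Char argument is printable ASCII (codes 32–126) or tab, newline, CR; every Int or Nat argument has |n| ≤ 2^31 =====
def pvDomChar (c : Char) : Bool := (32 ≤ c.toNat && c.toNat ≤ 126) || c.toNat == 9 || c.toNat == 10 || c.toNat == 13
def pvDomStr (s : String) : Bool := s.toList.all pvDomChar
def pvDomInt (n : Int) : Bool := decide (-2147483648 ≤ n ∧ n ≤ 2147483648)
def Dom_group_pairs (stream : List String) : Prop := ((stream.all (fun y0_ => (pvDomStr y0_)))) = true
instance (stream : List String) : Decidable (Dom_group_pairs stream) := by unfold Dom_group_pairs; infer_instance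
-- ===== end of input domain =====

-- B replaces A's backward-looking `previous` accumulator with a zip of the list
-- against its shifted-by-one self extended with None (idiomatic; same cost).
-- Both Pythons are generators; the equivalence is about the yielded sequence.

-- ===== PORT A =====
-- the loop body: `previous` carried through the recursion; `if previous:` is
-- Python truthiness on Optional[str] (some nonempty string)
def groupPairsAux (previous : Option String) : List String → List (String × Option String)
  | [] =>
      match previous with
      | some p => if p ≠ "" then [(p, none)] else []
      | none => []
  | item :: rest =>
      (match previous with
       | some p => if p ≠ "" then [(p, some item)] else []
       | none => []) ++ groupPairsAux (some item) rest

def group_pairs (stream : List String) : List (String × Option String) :=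
  groupPairsAux none stream

-- ===== PORT B =====
-- zip(items, items[1:] + [None]), keeping pairs whose first component is truthy
def group_pairs_alt (stream : List String) : List (String × Option String) :=
  (stream.zip ((stream.drop 1).map Option.some ++ [(none : Option String)])).filter
    (fun p => p.1 != "")

-- ===== PRECONDITION & SPEC =====
def Spec_group_pairs (stream : List String) (out : List (String × Option String)) : Prop := out = group_pairs_alt stream
instance (stream : List String) (out : List (String × Option String)) : Decidable (Spec_group_pairs stream out) := by unfold Spec_group_pairs; infer_instance

-- ===== CLAIM (what is proved, stated in full; the proofs are below) =====
def Claim_equal_group_pairs : Prop := ∀ (stream : List String), Dom_group_pairs stream → Spec_group_pairs stream (group_pairs stream)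

-- ===== LEMMAS AND PROOFS =====

-- the pair A yields on entering a loop step / at the end, as a function of the head
def truthyPair (previous : Option String) (h : Option String) : List (String × Option String) :=
  match previous with
  | some p => if p ≠ "" then [(p, h)] else []
  | none => []

theorem alt_cons (x : String) (rest : List String) :
    group_pairs_alt (x :: rest) = truthyPair (some x) rest.head? ++ group_pairs_alt rest := by
  cases rest with
  | nil => simp [group_pairs_alt, truthyPair]; split <;> simp_all
  | cons y r =>
      simp [group_pairs_alt, truthyPair, List.filter]
      split <;> simp_all

theorem aux_eq (l : List String) : ∀ previous,
    groupPairsAux previous l = truthyPair previous l.head? ++ group_pairs_alt l := by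
  induction l with
  | nil =>
      intro previous
      cases previous with
      | none => simp [groupPairsAux, truthyPair, group_pairs_alt]
      | some p => simp [groupPairsAux, truthyPair, group_pairs_alt]
  | cons x rest ih =>
      intro previous
      have : groupPairsAux previous (x :: rest)
          = truthyPair previous (some x) ++ groupPairsAux (some x) rest := by
        cases previous with
        | none => simp [groupPairsAux, truthyPair]
        | some p => simp [groupPairsAux, truthyPair]
      rw [this, ih (some x), alt_cons]
      simp

-- ===== VERDICT (by name: the statement is the Claim_ definition above) =====
theorem group_pairs_spec : Claim_equal_group_pairs := by
  intro stream _
  show group_pairs stream = group_pairs_alt stream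
  rw [group_pairs, aux_eq stream none]
  simp [truthyPair]
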